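-- pv_equiv track=rewrite | github.com/MrHuxu/leetcode | validate-ip-address.py | validateV4Part
-- ===== SOURCE A (Python) =====
-- def validateV4Part(s: str) -> bool:
--     if not s:
--         return False
--     if any(ord(ch) < ord("0") or ord(ch) > ord("9") for ch in s):
--         return False
--     num = int(s)
--     if num < 0 or num > 255:
--         return False
--     return str(num) == s
-- ===== SOURCE B (Python) =====
-- def validateV4Part(s: str) -> bool:
--     if not s:
--         return False
--     for ch in s:
--         if ch < '0' or ch > '9':
--             return False
--     if len(s) > 1 and s[0] == '0':
--         return False
--     if len(s) > 3:
--         return False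
--     if len(s) == 3 and s > '255':
--         return False
--     return True
-- ===== Notes on version B (the rewrite author's own statement) =====
-- stated objective: alternative
-- what changed: B validates the part purely as a string (explicit ASCII digit range, leading-zero test, length bound, lexicographic comparison with "255") instead of A's int() parse, numeric range check and str() round-trip.
import Mathlib
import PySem

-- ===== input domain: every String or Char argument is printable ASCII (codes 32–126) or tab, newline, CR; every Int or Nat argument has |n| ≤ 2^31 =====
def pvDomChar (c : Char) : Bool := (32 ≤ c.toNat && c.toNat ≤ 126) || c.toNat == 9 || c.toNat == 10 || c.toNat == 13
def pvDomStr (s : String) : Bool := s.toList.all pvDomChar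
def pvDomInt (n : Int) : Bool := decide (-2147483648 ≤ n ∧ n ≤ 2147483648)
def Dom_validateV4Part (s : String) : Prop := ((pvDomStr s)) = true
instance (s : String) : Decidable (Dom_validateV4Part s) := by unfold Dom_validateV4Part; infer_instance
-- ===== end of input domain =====

-- B replaces A's int()-parse-and-roundtrip with a pure string/length validation
-- (character range, leading-zero test, length bound, lexicographic "255" bound);
-- objective: alternative decomposition, same cost.

-- ===== PORT A =====
-- A: empty → False; any char outside '0'..'9' (by ord) → False; num = int(s);
-- range check 0..255; str(num) == s (string equality ported via toList, exact).
def validateV4Part (s : String) : Bool :=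
  if s.toList.isEmpty then false
  else if s.toList.any (fun ch => decide (ch.toNat < 48) || decide (57 < ch.toNat)) then false
    -- ord(ch) < ord('0')=48 or ord(ch) > ord('9')=57
  else
    match PySem.Int.ofStr? s with   -- int(s); never none here (all chars are digits)
    | none => false
    | some num =>
      if decide (num < 0) || decide (255 < num) then false
      else PySem.Int.toChars num == s.toList   -- str(num) == s

-- ===== PORT B =====
-- B (Source B): empty guard; per-char '0' ≤ ch ≤ '9'; reject leading zero; reject len > 3;
-- for len == 3 reject s > "255" (Python lexicographic compare = List.lt on chars, exact).
def validateV4Part_alt (s : String) : Bool :=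
  let l := s.toList
  if l.isEmpty then false
  else if l.any (fun ch => decide (ch < '0') || decide ('9' < ch)) then false
  else if decide (1 < l.length) && (PySem.List.pyGetD l 0 '?' == '0') then false  -- s[0], guarded by len>1
  else if decide (3 < l.length) then false
  else if (l.length == 3) && decide (['2','5','5'] < l) then false  -- s > "255"
  else true

-- ===== PRECONDITION & SPEC =====
def Spec_validateV4Part (s : String) (out : Bool) : Prop := out = validateV4Part_alt s
instance (s : String) (out : Bool) : Decidable (Spec_validateV4Part s out) := by unfold Spec_validateV4Part; infer_instance

-- ===== CLAIM (what is proved, stated in full; the proofs are below) =====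
def Claim_equal_validateV4Part : Prop := ∀ (s : String), Dom_validateV4Part s → Spec_validateV4Part s (validateV4Part s)

-- ===== LEMMAS AND PROOFS =====

-- proof-only copies of the two port bodies, over a bare List Char
def aRun (l : List Char) : Bool :=
  if l.isEmpty then false
  else if l.any (fun ch => decide (ch.toNat < 48) || decide (57 < ch.toNat)) then false
  else
    match PySem.Int.ofChars? l with
    | none => false
    | some num =>
      if decide (num < 0) || decide (255 < num) then false
      else PySem.Int.toChars num == l

def bRun (l : List Char) : Bool :=
  if l.isEmpty then false
  else if l.any (fun ch => decide (ch < '0') || decide ('9' < ch)) then false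
  else if decide (1 < l.length) && (PySem.List.pyGetD l 0 '?' == '0') then false
  else if decide (3 < l.length) then false
  else if (l.length == 3) && decide (['2','5','5'] < l) then false
  else true

theorem portA_eq (s : String) : validateV4Part s = aRun s.toList := rfl
theorem portB_eq (s : String) : validateV4Part_alt s = bRun s.toList := rfl

theorem lt_zero_char (c : Char) : (c < '0') ↔ c.toNat < 48 := by
  rw [Char.lt_def, UInt32.lt_iff_toNat_lt]; exact Iff.rfl

theorem nine_lt_char (c : Char) : ('9' < c) ↔ 57 < c.toNat := by
  rw [Char.lt_def, UInt32.lt_iff_toNat_lt]; exact Iff.rfl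

theorem digitTest (c : Char) :
    (decide (c < '0') || decide ('9' < c)) = (decide (c.toNat < 48) || decide (57 < c.toNat)) := by
  rw [decide_eq_decide.mpr (lt_zero_char c), decide_eq_decide.mpr (nine_lt_char c)]

set_option maxRecDepth 4096 in
theorem len_toChars_nat : ∀ m < 256, (PySem.Int.toChars ((m : Nat) : Int)).length ≤ 3 := by decide

theorem len_toChars (n : Int) (h0 : 0 ≤ n) (h1 : n ≤ 255) : (PySem.Int.toChars n).length ≤ 3 := by
  have := len_toChars_nat n.toNat (by omega)
  rwa [Int.toNat_of_nonneg h0] at this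

set_option maxRecDepth 4096 in
theorem case1 : ∀ d1 < 10, aRun [Char.ofNat (48 + d1)] = bRun [Char.ofNat (48 + d1)] := by decide

set_option maxRecDepth 4096 in
theorem case2 : ∀ d1 < 10, ∀ d2 < 10,
    aRun [Char.ofNat (48 + d1), Char.ofNat (48 + d2)] =
    bRun [Char.ofNat (48 + d1), Char.ofNat (48 + d2)] := by decide

set_option maxRecDepth 8192 in
theorem case3 : ∀ d1 < 10, ∀ d2 < 10, ∀ d3 < 10,
    aRun [Char.ofNat (48 + d1), Char.ofNat (48 + d2), Char.ofNat (48 + d3)] =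
    bRun [Char.ofNat (48 + d1), Char.ofNat (48 + d2), Char.ofNat (48 + d3)] := by decide

theorem char_eq_ofNat {c : Char} (h : 48 ≤ c.toNat ∧ c.toNat ≤ 57) :
    c = Char.ofNat (48 + (c.toNat - 48)) ∧ c.toNat - 48 < 10 := by
  constructor
  · rw [show 48 + (c.toNat - 48) = c.toNat by omega, Char.ofNat_toNat]
  · omega

theorem run_eq (l : List Char) : aRun l = bRun l := by
  have hc : (fun ch => decide (ch < '0') || decide ('9' < ch)) =
      (fun ch : Char => decide (ch.toNat < 48) || decide (57 < ch.toNat)) := funext digitTest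
  by_cases hany : l.any (fun ch => decide (ch.toNat < 48) || decide (57 < ch.toNat)) = true
  · -- a non-digit character: both return false (or l = [], also both false)
    cases l with
    | nil => rfl
    | cons a t =>
      simp only [aRun, bRun, List.isEmpty_cons, Bool.false_eq_true, if_false, hc, hany, if_true]
  · have hall : ∀ c ∈ l, 48 ≤ c.toNat ∧ c.toNat ≤ 57 := by
      intro c hcmem
      have := List.any_eq_false.mp (Bool.not_eq_true _ ▸ hany) c hcmem
      simp only [Bool.or_eq_true, decide_eq_true_eq, not_or, not_lt] at this
      exact ⟨this.1, this.2⟩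
    match l with
    | [] => rfl
    | [a] =>
      obtain ⟨ha, hd⟩ := char_eq_ofNat (hall a (by simp))
      rw [ha]; exact case1 _ hd
    | [a, b] =>
      obtain ⟨ha, hda⟩ := char_eq_ofNat (hall a (by simp))
      obtain ⟨hb, hdb⟩ := char_eq_ofNat (hall b (by simp))
      rw [ha, hb]; exact case2 _ hda _ hdb
    | [a, b, c] =>
      obtain ⟨ha, hda⟩ := char_eq_ofNat (hall a (by simp))
      obtain ⟨hb, hdb⟩ := char_eq_ofNat (hall b (by simp))
      obtain ⟨hcc, hdc⟩ := char_eq_ofNat (hall c (by simp))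
      rw [ha, hb, hcc]; exact case3 _ hda _ hdb _ hdc
    | a :: b :: c :: d :: t =>
      -- length ≥ 4: both sides are false
      have hb : bRun (a :: b :: c :: d :: t) = false := by
        simp only [bRun, List.isEmpty_cons, Bool.false_eq_true, if_false, hc, hany]
        by_cases h0 : (decide (1 < (a :: b :: c :: d :: t).length) &&
            (PySem.List.pyGetD (a :: b :: c :: d :: t) 0 '?' == '0')) = true
        · rw [if_pos h0]
        · rw [if_neg h0, if_pos (by simp [List.length_cons])]
      have ha : aRun (a :: b :: c :: d :: t) = false := by
        simp only [aRun, List.isEmpty_cons, Bool.false_eq_true, if_false, hany]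
        cases hof : PySem.Int.ofChars? (a :: b :: c :: d :: t) with
        | none => rfl
        | some num =>
          dsimp only
          by_cases hr : (decide (num < 0) || decide (255 < num)) = true
          · rw [if_pos hr]
          · rw [if_neg hr]
            simp only [Bool.or_eq_true, decide_eq_true_eq, not_or, not_lt] at hr
            have hlen := len_toChars num hr.1 hr.2
            rw [beq_eq_false_iff_ne]
            intro heq
            have : (PySem.Int.toChars num).length = (a :: b :: c :: d :: t).length :=
              congrArg List.length heq
            simp [List.length_cons] at this
            omega
      rw [ha, hb]

-- ===== VERDICT (by name: the statement is the Claim_ definition above) =====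
theorem validateV4Part_spec : Claim_equal_validateV4Part := by
  intro s _
  show validateV4Part s = validateV4Part_alt s
  rw [portA_eq, portB_eq]
  exact run_eq s.toList
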